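-- pv_equiv track=rewrite | github.com/logzio/dashboard-metrics-extractor | extract.py | _find_grouping
-- ===== SOURCE A (Python) =====
-- def _find_grouping(query_string):
--     grouping_indices = []
--     grouping_statements = ['by(', 'on(', ',', 'group_right(', 'group_left(', 'sum_rate(']
--     for statement in grouping_statements:
--         try:
--             indices = [i for i in range(len(query_string)) if query_string.startswith(statement, i)]
--             for idx in indices:
--                 grouping_indices.append(idx + len(statement))
--         except ValueError:
--             pass
--
--     return grouping_indices
-- ===== SOURCE B (Python) =====
-- def _find_grouping(query_string):
--     by_hits = []; on_hits = []; comma_hits = []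
--     gr_hits = []; gl_hits = []; sr_hits = []
--     for i in range(len(query_string)):
--         ch = query_string[i]
--         if ch == 'b':
--             if query_string.startswith('by(', i):
--                 by_hits.append(i + 3)
--         elif ch == 'o':
--             if query_string.startswith('on(', i):
--                 on_hits.append(i + 3)
--         elif ch == ',':
--             comma_hits.append(i + 1)
--         elif ch == 'g':
--             if query_string.startswith('group_right(', i):
--                 gr_hits.append(i + 12)
--             if query_string.startswith('group_left(', i):
--                 gl_hits.append(i + 11)
--         elif ch == 's':
--             if query_string.startswith('sum_rate(', i):
--                 sr_hits.append(i + 9)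
--     return by_hits + on_hits + comma_hits + gr_hits + gl_hits + sr_hits
-- ===== Notes on version B (the rewrite author's own statement) =====
-- stated objective: faster
-- what changed: Replaces A's six separate whole-string scans (one list comprehension per statement) with a single left-to-right pass that dispatches on the current character and appends matches to six per-statement buckets, concatenated at the end.
import Mathlib
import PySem

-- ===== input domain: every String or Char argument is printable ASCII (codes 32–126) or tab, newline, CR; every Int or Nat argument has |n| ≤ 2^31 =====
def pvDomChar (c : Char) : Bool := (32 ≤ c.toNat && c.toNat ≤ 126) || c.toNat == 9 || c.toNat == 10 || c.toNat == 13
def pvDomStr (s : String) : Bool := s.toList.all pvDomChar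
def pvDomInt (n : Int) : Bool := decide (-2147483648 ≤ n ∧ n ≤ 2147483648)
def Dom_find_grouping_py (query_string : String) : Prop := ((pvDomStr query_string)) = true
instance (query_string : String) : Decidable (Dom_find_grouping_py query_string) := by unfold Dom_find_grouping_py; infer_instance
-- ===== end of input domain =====

-- B replaces A's six separate whole-string scans (one per statement) by a SINGLE pass over
-- the string that dispatches on the current character and fills six per-statement buckets,
-- concatenated at the end; one pass instead of six (constant-factor mechanism, see claim).

-- ===== PORT A =====
-- A: for each statement, list-comprehension over all indices testing startswith, then append
-- idx + len(statement).  The try/except ValueError is dead code (nothing raises ValueError).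
def pvStmts : List (List Char) :=
  ["by(".toList, "on(".toList, ",".toList, "group_right(".toList, "group_left(".toList,
   "sum_rate(".toList]

def find_grouping_py (query_string : String) : List Int :=
  let qs := query_string.toList
  pvStmts.foldl
    (fun grouping_indices statement =>
      let indices := (List.range qs.length).filter
        (fun i => PySem.Chars.startswith (qs.drop i) statement)
      grouping_indices ++ indices.map (fun idx : Nat => (idx : Int) + statement.length))
    []

-- ===== PORT B =====
-- the six bucket lists of Source B, filled in one pass
structure PvBuckets where
  b : List Int
  o : List Int
  c : List Int
  gr : List Int
  gl : List Int
  sr : List Int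
deriving Repr, DecidableEq

-- one iteration of Source B's loop body: ch = query_string[i] (always in range, so getD is
-- exact here), then the if/elif chain on ch
def pvStep (qs : List Char) (acc : PvBuckets) (i : Nat) : PvBuckets :=
  let ch := qs.getD i ' '
  if ch = 'b' then
    if PySem.Chars.startswith (qs.drop i) "by(".toList then
      { acc with b := acc.b ++ [(i : Int) + 3] } else acc
  else if ch = 'o' then
    if PySem.Chars.startswith (qs.drop i) "on(".toList then
      { acc with o := acc.o ++ [(i : Int) + 3] } else acc
  else if ch = ',' then { acc with c := acc.c ++ [(i : Int) + 1] }
  else if ch = 'g' then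
    let acc1 := if PySem.Chars.startswith (qs.drop i) "group_right(".toList then
      { acc with gr := acc.gr ++ [(i : Int) + 12] } else acc
    if PySem.Chars.startswith (qs.drop i) "group_left(".toList then
      { acc1 with gl := acc1.gl ++ [(i : Int) + 11] } else acc1
  else if ch = 's' then
    if PySem.Chars.startswith (qs.drop i) "sum_rate(".toList then
      { acc with sr := acc.sr ++ [(i : Int) + 9] } else acc
  else acc

def find_grouping_py_alt (query_string : String) : List Int :=
  let qs := query_string.toList
  let acc := (List.range qs.length).foldl (pvStep qs) ⟨[], [], [], [], [], []⟩
  acc.b ++ acc.o ++ acc.c ++ acc.gr ++ acc.gl ++ acc.sr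

-- ===== PRECONDITION & SPEC =====
def Spec_find_grouping_py (query_string : String) (out : List Int) : Prop := out = find_grouping_py_alt query_string
instance (query_string : String) (out : List Int) : Decidable (Spec_find_grouping_py query_string out) := by unfold Spec_find_grouping_py; infer_instance

-- ===== CLAIM (what is proved, stated in full; the proofs are below) =====
def Claim_equal_find_grouping_py : Prop := ∀ (query_string : String), Dom_find_grouping_py query_string → Spec_find_grouping_py query_string (find_grouping_py query_string)

-- ===== LEMMAS AND PROOFS =====

-- if statement starts at i, the character at i is the statement's head
theorem pvHead_of_startswith (qs : List Char) (i : Nat) (c : Char) (rest : List Char)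
    (h : PySem.Chars.startswith (qs.drop i) (c :: rest) = true) :
    qs.getD i ' ' = c := by
  obtain ⟨t, ht⟩ := (PySem.Chars.startswith_iff _ _).mp h
  have h0 : (qs.drop i).getD 0 ' ' = c := by rw [← ht]; rfl
  have hlen : i < qs.length := by
    have := congrArg List.length ht
    simp [List.length_drop] at this
    omega
  rw [List.getD_eq_getElem?_getD] at h0 ⊢
  rw [List.getElem?_drop] at h0
  simpa using h0

-- the head test in B's dispatch is redundant once startswith holds: the two filters agree
theorem pvFilter_head (qs : List Char) (c : Char) (rest : List Char) :
    (List.range qs.length).filter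
        (fun i => decide (qs.getD i ' ' = c) && PySem.Chars.startswith (qs.drop i) (c :: rest))
      = (List.range qs.length).filter
        (fun i => PySem.Chars.startswith (qs.drop i) (c :: rest)) := by
  apply List.filter_congr
  intro i _
  by_cases hsw : PySem.Chars.startswith (qs.drop i) (c :: rest) = true
  · have hh := pvHead_of_startswith qs i c rest hsw
    rw [hsw, hh]
    simp
  · simp [hsw]

-- for i in range, the bare head test for ',' equals startswith on the one-char statement
theorem pvFilter_comma (qs : List Char) :
    (List.range qs.length).filter (fun i => decide (qs.getD i ' ' = ','))
      = (List.range qs.length).filter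
        (fun i => PySem.Chars.startswith (qs.drop i) [',']) := by
  apply List.filter_congr
  intro i hi
  simp only [List.mem_range] at hi
  by_cases hc : qs.getD i ' ' = ','
  · have hdrop : qs.drop i = qs[i] :: qs.drop (i + 1) := List.drop_eq_getElem_cons hi
    have hci : qs[i] = ',' := by
      rw [List.getD_eq_getElem?_getD, List.getElem?_eq_getElem hi] at hc
      simpa using hc
    have hsw : PySem.Chars.startswith (qs.drop i) [','] = true := by
      rw [PySem.Chars.startswith_iff]
      exact ⟨qs.drop (i + 1), by rw [hdrop, hci]; rfl⟩
    rw [List.getD_eq_getElem?_getD] at hc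
    simp [hc, hsw]
  · have hsw : PySem.Chars.startswith (qs.drop i) [','] = false := by
      rw [Bool.eq_false_iff]
      intro h
      exact hc (pvHead_of_startswith qs i ',' [] h)
    rw [List.getD_eq_getElem?_getD] at hc
    simp [hc, hsw]

-- per-component characterisations of the one-pass fold (one per bucket)
theorem pvFold_b (qs : List Char) : ∀ (l : List Nat) (acc : PvBuckets),
    (l.foldl (pvStep qs) acc).b
      = acc.b ++ (l.filter (fun i => decide (qs.getD i ' ' = 'b')
          && PySem.Chars.startswith (qs.drop i) "by(".toList)).map
            (fun i : Nat => (i : Int) + 3) := by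
  intro l
  induction l with
  | nil => intro acc; simp
  | cons i l ih =>
    intro acc
    simp only [List.foldl_cons, List.filter_cons, ih, pvStep]
    split_ifs with h1 h2 h3 h4 h5 h6 h7 <;> simp_all
theorem pvFold_o (qs : List Char) : ∀ (l : List Nat) (acc : PvBuckets),
    (l.foldl (pvStep qs) acc).o
      = acc.o ++ (l.filter (fun i => decide (qs.getD i ' ' = 'o')
          && PySem.Chars.startswith (qs.drop i) "on(".toList)).map
            (fun i : Nat => (i : Int) + 3) := by
  intro l
  induction l with
  | nil => intro acc; simp
  | cons i l ih =>
    intro acc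
    simp only [List.foldl_cons, List.filter_cons, ih, pvStep]
    split_ifs with h1 h2 h3 h4 h5 h6 h7 <;> simp_all
theorem pvFold_c (qs : List Char) : ∀ (l : List Nat) (acc : PvBuckets),
    (l.foldl (pvStep qs) acc).c
      = acc.c ++ (l.filter (fun i => decide (qs.getD i ' ' = ','))).map
            (fun i : Nat => (i : Int) + 1) := by
  intro l
  induction l with
  | nil => intro acc; simp
  | cons i l ih =>
    intro acc
    simp only [List.foldl_cons, List.filter_cons, ih, pvStep]
    split_ifs with h1 h2 h3 h4 h5 h6 h7 <;> simp_all
theorem pvFold_gr (qs : List Char) : ∀ (l : List Nat) (acc : PvBuckets),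
    (l.foldl (pvStep qs) acc).gr
      = acc.gr ++ (l.filter (fun i => decide (qs.getD i ' ' = 'g')
          && PySem.Chars.startswith (qs.drop i) "group_right(".toList)).map
            (fun i : Nat => (i : Int) + 12) := by
  intro l
  induction l with
  | nil => intro acc; simp
  | cons i l ih =>
    intro acc
    simp only [List.foldl_cons, List.filter_cons, ih, pvStep]
    split_ifs with h1 h2 h3 h4 h5 h6 h7 <;> simp_all
theorem pvFold_gl (qs : List Char) : ∀ (l : List Nat) (acc : PvBuckets),
    (l.foldl (pvStep qs) acc).gl
      = acc.gl ++ (l.filter (fun i => decide (qs.getD i ' ' = 'g')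
          && PySem.Chars.startswith (qs.drop i) "group_left(".toList)).map
            (fun i : Nat => (i : Int) + 11) := by
  intro l
  induction l with
  | nil => intro acc; simp
  | cons i l ih =>
    intro acc
    simp only [List.foldl_cons, List.filter_cons, ih, pvStep]
    split_ifs with h1 h2 h3 h4 h5 h6 h7 <;> simp_all
theorem pvFold_sr (qs : List Char) : ∀ (l : List Nat) (acc : PvBuckets),
    (l.foldl (pvStep qs) acc).sr
      = acc.sr ++ (l.filter (fun i => decide (qs.getD i ' ' = 's')
          && PySem.Chars.startswith (qs.drop i) "sum_rate(".toList)).map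
            (fun i : Nat => (i : Int) + 9) := by
  intro l
  induction l with
  | nil => intro acc; simp
  | cons i l ih =>
    intro acc
    simp only [List.foldl_cons, List.filter_cons, ih, pvStep]
    split_ifs with h1 h2 h3 h4 h5 h6 h7 <;> simp_all

-- ===== VERDICT (by name: the statement is the Claim_ definition above) =====
theorem find_grouping_py_spec : Claim_equal_find_grouping_py := by
  intro q _
  unfold Spec_find_grouping_py find_grouping_py find_grouping_py_alt
  simp only [pvStmts, List.foldl, List.nil_append]
  rw [pvFold_b, pvFold_o, pvFold_c, pvFold_gr, pvFold_gl, pvFold_sr]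
  simp only [show "by(".toList = ['b','y','('] from rfl,
    show "on(".toList = ['o','n','('] from rfl,
    show ",".toList = [','] from rfl,
    show "group_right(".toList = ['g','r','o','u','p','_','r','i','g','h','t','('] from rfl,
    show "group_left(".toList = ['g','r','o','u','p','_','l','e','f','t','('] from rfl,
    show "sum_rate(".toList = ['s','u','m','_','r','a','t','e','('] from rfl]
  rw [pvFilter_head, pvFilter_head, pvFilter_comma, pvFilter_head, pvFilter_head,
      pvFilter_head]
  simp
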